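-- pv_equiv track=rewrite | github.com/Rayvivek881/python_django | algorithum/janies_Root.py | jeanisRoute
-- ===== SOURCE A (Python) =====
-- from collections import defaultdict
--
-- def jeanisRoute(k, roads, cities):
--     g, start, cities = defaultdict(dict), cities[0], set(cities)
--     for i, j, w in roads:
--         g[i][j] = g[j][i] = w
--     visited = set()
--     ans = [0, 0]
--     def dfs(node, dis=0):
--         visited.add(node)
--         isBelong = node in cities
--         minus = [0, 0]
--         for i, val in g[node].items():
--             if i not in visited:
--                 d = dfs(i, dis + val) - dis
--                 if d > 0:
--                     isBelong = True
--                     ans[0] += 2 * g[node][i]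
--                     if d > minus[0]:
--                         minus[1], minus[0] = max(minus), d
--                     else:
--                         minus[1] = max(minus[1], d)
--         ans[1] = max(ans[1], sum(minus))
--         return dis + max(minus) if isBelong else 0
--     dfs(start)
--     return ans[0] - ans[1]
-- ===== SOURCE B (Python) =====
-- def jeanisRoute(k, roads, cities):
--     adj = {}
--     for a, b, w in roads:
--         adj.setdefault(a, {})[b] = w
--         adj.setdefault(b, {})[a] = w
--     targets = set(cities)
--     start = cities[0]
--
--     # pass 1: extract the DFS spanning tree (visit order, tree children, depth distance)
--     order, children, dist, seen = [], {}, {start: 0}, {start}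
--     def build(node):
--         order.append(node)
--         children[node] = []
--         for nxt, w in adj.get(node, {}).items():
--             if nxt not in seen:
--                 seen.add(nxt)
--                 dist[nxt] = dist[node] + w
--                 children[node].append((nxt, w))
--                 build(nxt)
--     build(start)
--
--     # pass 2: bottom-up table DP over the reversed visit order
--     total, best = 0, 0
--     belong, gain = {}, {}
--     for node in reversed(order):
--         ds = [(w + gain[c] if belong[c] else -dist[node], w) for c, w in children[node]]
--         pos = [d for d, _ in ds if d > 0]
--         total += 2 * sum(w for d, w in ds if d > 0)
--         top = sorted(pos)[-2:]
--         belong[node] = node in targets or bool(pos)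
--         gain[node] = top[-1] if top else 0
--         best = max(best, sum(top))
--     return total - best
-- ===== Notes on version B (the rewrite author's own statement) =====
-- stated objective: alternative
-- what changed: A computes the answer inside a single DFS closure that mutates shared accumulators (ans[0]/ans[1], the minus top-two shuffle); B splits the work into two staged passes: pass 1 is a plain DFS that only extracts the spanning-tree structure (visit order, tree children, depth distance) and pass 2 is a non-recursive bottom-up table DP over the reversed visit order, computing each node's gain via sorted(pos)[-2:] instead of a streaming top-two update.
import Mathlib
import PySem

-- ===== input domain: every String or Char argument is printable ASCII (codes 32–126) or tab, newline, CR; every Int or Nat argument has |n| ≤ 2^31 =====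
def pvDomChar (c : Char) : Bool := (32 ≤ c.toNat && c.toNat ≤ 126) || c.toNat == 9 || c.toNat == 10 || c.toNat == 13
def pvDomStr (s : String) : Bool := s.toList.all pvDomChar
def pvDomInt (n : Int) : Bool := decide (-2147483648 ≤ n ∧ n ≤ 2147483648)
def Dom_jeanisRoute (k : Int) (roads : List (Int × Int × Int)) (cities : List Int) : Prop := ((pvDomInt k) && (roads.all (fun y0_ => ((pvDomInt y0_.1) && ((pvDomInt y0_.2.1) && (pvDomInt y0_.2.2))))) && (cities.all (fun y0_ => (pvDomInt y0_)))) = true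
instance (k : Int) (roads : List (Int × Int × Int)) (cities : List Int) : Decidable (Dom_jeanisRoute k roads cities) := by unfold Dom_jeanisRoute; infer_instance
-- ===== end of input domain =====

-- B replaces A's single value-computing DFS closure by two staged passes: pass 1 extracts the
-- DFS spanning tree (visit order, tree children, depth distance), pass 2 is a bottom-up table
-- DP over the reversed visit order (objective: alternative, same cost).

-- ===== PORT A =====
-- mutable state of A's dfs: (visited, ans[0], ans[1])
structure ASt where
  vis : PySem.Set Int
  a0 : Int
  a1 : Int
deriving Repr, DecidableEq

-- state of A's `for i, val in g[node].items()` loop: (state, isBelong, minus[0], minus[1])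
structure ALoop where
  st : ASt
  isB : Bool
  m0 : Int
  m1 : Int
deriving Repr, DecidableEq

-- g[i][j] = g[j][i] = w over a defaultdict(dict)
def buildA (roads : List (Int × Int × Int)) : PySem.Dict Int (PySem.Dict Int Int) :=
  roads.foldl
    (fun g p =>
      let g := g.insert p.1 ((g.getD p.1 PySem.Dict.empty).insert p.2.1 p.2.2)
      g.insert p.2.1 ((g.getD p.2.1 PySem.Dict.empty).insert p.1 p.2.2))
    PySem.Dict.empty

-- A's `for i, val in g[node].items()` loop; `dfs` is the recursive call at the next depth
def loopA (g : PySem.Dict Int (PySem.Dict Int Int)) (dfs : Int → Int → ASt → Int × ASt)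
    (node dis : Int) : List (Int × Int) → ALoop → ALoop
  | [], acc => acc
  | p :: rest, acc =>
    if PySem.Set.contains acc.st.vis p.1 then
      loopA g dfs node dis rest acc
    else
      let rs := dfs p.1 (dis + p.2) acc.st
      let d := rs.1 - dis
      if 0 < d then
        let st := { rs.2 with a0 := rs.2.a0 + 2 * ((g.getD node PySem.Dict.empty).getD p.1 0) }
        if acc.m0 < d then
          loopA g dfs node dis rest ⟨st, true, d, max acc.m0 acc.m1⟩
        else
          loopA g dfs node dis rest ⟨st, true, acc.m0, max acc.m1 d⟩
      else
        loopA g dfs node dis rest { acc with st := rs.2 }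

-- A's dfs; fuel only pads the recursion depth (2*|roads|+2 at the top call always exceeds
-- the real depth, which is bounded by the number of distinct visited nodes + 1).
-- `g[node]` on a defaultdict is ported as getD with an empty dict: the entry a plain read
-- would create is empty and never read again, so the results coincide.
def dfsA (g : PySem.Dict Int (PySem.Dict Int Int)) (cset : PySem.Set Int) :
    Nat → Int → Int → ASt → Int × ASt
  | 0 => fun _ _ s => (0, s)
  | fuel + 1 => fun node dis s =>
    let s := { s with vis := PySem.Set.add s.vis node }
    let r := loopA g (dfsA g cset fuel) node dis ((g.getD node PySem.Dict.empty).items)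
      ⟨s, PySem.Set.contains cset node, 0, 0⟩
    ((if r.isB then dis + max r.m0 r.m1 else 0),
     { r.st with a1 := max r.st.a1 (r.m0 + r.m1) })

def jeanisRoute (k : Int) (roads : List (Int × Int × Int)) (cities : List Int) : Int :=
  match cities with
  | [] => 0   -- Python raises IndexError on cities[0]; excluded by Pre_
  | c :: _ =>
    let g := buildA roads
    let cset := PySem.Set.ofList cities
    let r := dfsA g cset (2 * roads.length + 2) c 0 ⟨PySem.Set.empty, 0, 0⟩
    r.2.a0 - r.2.a1

-- ===== PORT B =====
-- pass-1 state: (order, children, dist, seen)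
structure S1 where
  order : List Int
  children : PySem.Dict Int (List (Int × Int))
  dist : PySem.Dict Int Int
  seen : PySem.Set Int
deriving Repr, DecidableEq

-- pass-2 state: (total, best, belong, gain)
structure DP where
  total : Int
  best : Int
  belong : PySem.Dict Int Bool
  gain : PySem.Dict Int Int
deriving Repr, DecidableEq

-- adj.setdefault(a, {})[b] = w; adj.setdefault(b, {})[a] = w
def buildB (roads : List (Int × Int × Int)) : PySem.Dict Int (PySem.Dict Int Int) :=
  roads.foldl
    (fun adj p =>
      let adj := adj.setdefault p.1 PySem.Dict.empty
      let adj := adj.insert p.1 ((adj.getD p.1 PySem.Dict.empty).insert p.2.1 p.2.2)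
      let adj := adj.setdefault p.2.1 PySem.Dict.empty
      adj.insert p.2.1 ((adj.getD p.2.1 PySem.Dict.empty).insert p.1 p.2.2))
    PySem.Dict.empty

-- B's `for nxt, w in adj.get(node, {}).items()` loop of build; `build` is the recursive call.
-- dist[node] is a plain lookup that never misses (node is always visited); getD is exact there.
def buildLoop (adj : PySem.Dict Int (PySem.Dict Int Int)) (build : Int → S1 → S1)
    (node : Int) : List (Int × Int) → S1 → S1
  | [], s => s
  | (nxt, w) :: rest, s =>
    if PySem.Set.contains s.seen nxt then buildLoop adj build node rest s
    else
      let s : S1 := { s with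
        seen := PySem.Set.add s.seen nxt,
        dist := s.dist.insert nxt (s.dist.getD node 0 + w),
        children := s.children.insert node ((s.children.getD node []) ++ [(nxt, w)]) }
      buildLoop adj build node rest (build nxt s)

-- B's build; fuel only pads the recursion depth (2*|roads|+2 at the top call always exceeds
-- the real depth, which is bounded by the number of distinct visited nodes + 1)
def buildT (adj : PySem.Dict Int (PySem.Dict Int Int)) : Nat → Int → S1 → S1
  | 0, _, s => s
  | fuel + 1, node, s =>
    let s : S1 := { s with order := s.order ++ [node], children := s.children.insert node [] }
    buildLoop adj (buildT adj fuel) node ((adj.getD node PySem.Dict.empty).items) s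

-- one iteration of B's pass-2 `for node in reversed(order)` loop.
-- belong[c], gain[c], dist[node] are plain lookups that never miss; getD is exact there.
def dpStep (tgt : PySem.Set Int) (children : PySem.Dict Int (List (Int × Int)))
    (dist : PySem.Dict Int Int) (st : DP) (node : Int) : DP :=
  let ds := (children.getD node []).map
    (fun p => ((if st.belong.getD p.1 false then p.2 + st.gain.getD p.1 0
                else -(dist.getD node 0)), p.2))
  let pos := (ds.filter (fun p => 0 < p.1)).map Prod.fst
  let total := st.total + 2 * ((ds.filter (fun p => 0 < p.1)).map Prod.snd).sum
  let top := PySem.List.slice (PySem.List.sorted pos (fun x => x) false) (some (-2)) none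
  let belong := st.belong.insert node (tgt.contains node || !pos.isEmpty)
  let gain := st.gain.insert node (if top.isEmpty then 0 else top.getLastD 0)
  ⟨total, max st.best top.sum, belong, gain⟩

def jeanisRoute_alt (k : Int) (roads : List (Int × Int × Int)) (cities : List Int) : Int :=
  match cities with
  | [] => 0   -- Python raises IndexError on cities[0]; excluded by Pre_
  | c :: _ =>
    let adj := buildB roads
    let tgt := PySem.Set.ofList cities
    let s0 : S1 := ⟨[], PySem.Dict.empty, PySem.Dict.ofList [(c, 0)], PySem.Set.ofList [c]⟩
    let s := buildT adj (2 * roads.length + 2) c s0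
    let r := s.order.reverse.foldl (dpStep tgt s.children s.dist) ⟨0, 0, PySem.Dict.empty, PySem.Dict.empty⟩
    r.total - r.best

-- ===== PRECONDITION & SPEC =====
-- Pre_ excludes only the empty cities list, on which the Python A raises IndexError at cities[0].
def Pre_jeanisRoute (k : Int) (roads : List (Int × Int × Int)) (cities : List Int) : Prop :=
  cities ≠ []
instance (k : Int) (roads : List (Int × Int × Int)) (cities : List Int) : Decidable (Pre_jeanisRoute k roads cities) := by unfold Pre_jeanisRoute; infer_instance

def pvWitness_jeanisRoute : Int × (List (Int × Int × Int)) × List Int := (0, [(1, 2, 3), (2, 3, 1)], [1, 3])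

def Spec_jeanisRoute (k : Int) (roads : List (Int × Int × Int)) (cities : List Int) (out : Int) : Prop := out = jeanisRoute_alt k roads cities
instance (k : Int) (roads : List (Int × Int × Int)) (cities : List Int) (out : Int) : Decidable (Spec_jeanisRoute k roads cities out) := by unfold Spec_jeanisRoute; infer_instance

-- ===== CLAIM (what is proved, stated in full; the proofs are below) =====
def Claim_equal_jeanisRoute : Prop := ∀ (k : Int) (roads : List (Int × Int × Int)) (cities : List Int), Dom_jeanisRoute k roads cities → Pre_jeanisRoute k roads cities → Spec_jeanisRoute k roads cities (jeanisRoute k roads cities)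

-- ===== LEMMAS AND PROOFS =====

-- adj.setdefault(k, {}) followed by adj[k] = v is the same dict as adj[k] = v
theorem sd_insert (d : PySem.Dict Int (PySem.Dict Int Int)) (k : Int) (v : PySem.Dict Int Int) :
    (d.setdefault k PySem.Dict.empty).insert k v = d.insert k v := by
  by_cases h : d.contains k = true
  · rw [PySem.Dict.setdefault_of_contains d PySem.Dict.empty h]
  · rw [PySem.Dict.setdefault_of_not_contains d PySem.Dict.empty (by simpa using h),
        PySem.Dict.insert_insert_self]

theorem build_step (g : PySem.Dict Int (PySem.Dict Int Int)) (p : Int × Int × Int) :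
    (fun adj (p : Int × Int × Int) =>
      let adj := adj.setdefault p.1 PySem.Dict.empty
      let adj := adj.insert p.1 ((adj.getD p.1 PySem.Dict.empty).insert p.2.1 p.2.2)
      let adj := adj.setdefault p.2.1 PySem.Dict.empty
      adj.insert p.2.1 ((adj.getD p.2.1 PySem.Dict.empty).insert p.1 p.2.2)) g p
    = (fun g (p : Int × Int × Int) =>
      let g := g.insert p.1 ((g.getD p.1 PySem.Dict.empty).insert p.2.1 p.2.2)
      g.insert p.2.1 ((g.getD p.2.1 PySem.Dict.empty).insert p.1 p.2.2)) g p := by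
  show ((g.setdefault p.1 PySem.Dict.empty).insert p.1
          (((g.setdefault p.1 PySem.Dict.empty).getD p.1 PySem.Dict.empty).insert p.2.1 p.2.2)
        |>.setdefault p.2.1 PySem.Dict.empty |>.insert p.2.1 _) = _
  rw [PySem.Dict.getD_setdefault_self, sd_insert]
  rw [PySem.Dict.getD_setdefault_self, sd_insert]

theorem buildB_eq_buildA (roads : List (Int × Int × Int)) : buildB roads = buildA roads := by
  unfold buildB buildA
  apply List.foldl_ext
  intro a x _
  exact build_step a x

theorem nodup_aux (l : List (Int × Int × Int)) :
    ∀ (g : PySem.Dict Int (PySem.Dict Int Int)),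
      (∀ n, (g.getD n PySem.Dict.empty).keys.Nodup) →
      ∀ n, ((l.foldl (fun g p =>
        let g := g.insert p.1 ((g.getD p.1 PySem.Dict.empty).insert p.2.1 p.2.2)
        g.insert p.2.1 ((g.getD p.2.1 PySem.Dict.empty).insert p.1 p.2.2)) g).getD n PySem.Dict.empty).keys.Nodup := by
  induction l with
  | nil => intro g h n; exact h n
  | cons p rest ih =>
    intro g h n
    rw [List.foldl_cons]
    refine ih _ ?_ n
    intro m
    show (((g.insert p.1 ((g.getD p.1 PySem.Dict.empty).insert p.2.1 p.2.2)).insert p.2.1 _).getD m PySem.Dict.empty).keys.Nodup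
    have hg1 : ∀ m', (((g.insert p.1 ((g.getD p.1 PySem.Dict.empty).insert p.2.1 p.2.2))).getD m' PySem.Dict.empty).keys.Nodup := by
      intro m'
      rw [PySem.Dict.getD_insert]
      split_ifs with hm
      · exact PySem.Dict.nodup_keys_insert _ _ _ (h p.1)
      · exact h m'
    rw [PySem.Dict.getD_insert]
    split_ifs with hm
    · exact PySem.Dict.nodup_keys_insert _ _ _ (hg1 p.2.1)
    · exact hg1 m

theorem nodup_inner_buildA (roads : List (Int × Int × Int)) (n : Int) :
    ((buildA roads).getD n PySem.Dict.empty).keys.Nodup := by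
  unfold buildA
  exact nodup_aux roads PySem.Dict.empty
    (fun m => by rw [PySem.Dict.getD_empty]; exact PySem.Dict.nodup_keys_empty) n

-- every key of an inner dict of buildA is also an outer key
theorem inner_sub_aux (l : List (Int × Int × Int)) :
    ∀ (g : PySem.Dict Int (PySem.Dict Int Int)),
      (∀ n x, ((g.getD n PySem.Dict.empty).contains x = true) → g.contains x = true) →
      ∀ n x, (((l.foldl (fun g p =>
        let g := g.insert p.1 ((g.getD p.1 PySem.Dict.empty).insert p.2.1 p.2.2)
        g.insert p.2.1 ((g.getD p.2.1 PySem.Dict.empty).insert p.1 p.2.2)) g).getD n PySem.Dict.empty).contains x = true) →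
        (l.foldl (fun g p =>
        let g := g.insert p.1 ((g.getD p.1 PySem.Dict.empty).insert p.2.1 p.2.2)
        g.insert p.2.1 ((g.getD p.2.1 PySem.Dict.empty).insert p.1 p.2.2)) g).contains x = true := by
  induction l with
  | nil => intro g h n x hx; exact h n x hx
  | cons p rest ih =>
    intro g h n x
    rw [List.foldl_cons]
    refine ih _ ?_ n x
    intro m y hy
    rw [PySem.Dict.contains_insert, PySem.Dict.contains_insert]
    by_cases hy1 : (y == p.2.1) = true
    · rw [hy1]; simp
    · by_cases hy2 : (y == p.1) = true
      · rw [hy2]; simp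
      · have hy1' : (y == p.2.1) = false := by simpa using hy1
        have hy2' : (y == p.1) = false := by simpa using hy2
        suffices hgy : g.contains y = true by rw [hgy]; simp
        rw [PySem.Dict.getD_insert] at hy
        split_ifs at hy with hm2
        · rw [PySem.Dict.contains_insert, hy2', Bool.false_or] at hy
          rw [PySem.Dict.getD_insert] at hy
          split_ifs at hy with hji
          · rw [PySem.Dict.contains_insert, hy1', Bool.false_or] at hy
            exact h p.1 y hy
          · exact h p.2.1 y hy
        · rw [PySem.Dict.getD_insert] at hy
          split_ifs at hy with hmi
          · rw [PySem.Dict.contains_insert, hy1', Bool.false_or] at hy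
            exact h p.1 y hy
          · exact h m y hy

theorem inner_sub_buildA (roads : List (Int × Int × Int)) (n x : Int)
    (h : ((buildA roads).getD n PySem.Dict.empty).contains x = true) :
    x ∈ (buildA roads).keys := by
  have hc : (buildA roads).contains x = true := by
    unfold buildA at h ⊢
    refine inner_sub_aux roads PySem.Dict.empty ?_ n x h
    intro m y hy
    rw [PySem.Dict.getD_empty] at hy
    rw [PySem.Dict.contains_empty] at hy
    cases hy
  exact (PySem.Dict.contains_iff_mem_keys _ _).mp hc

theorem keys_len_insert_le {κ ν : Type} [BEq κ] [LawfulBEq κ] (d : PySem.Dict κ ν) (k : κ) (v : ν) :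
    ((d.insert k v).keys).length ≤ d.keys.length + 1 := by
  by_cases hc : d.contains k = true
  · rw [PySem.Dict.keys_insert_of_contains _ _ hc]; omega
  · rw [PySem.Dict.keys_insert_of_not_contains _ _ (by simpa using hc)]
    simp

theorem keys_bound_aux (l : List (Int × Int × Int)) :
    ∀ (g : PySem.Dict Int (PySem.Dict Int Int)),
      ((l.foldl (fun g p =>
        let g := g.insert p.1 ((g.getD p.1 PySem.Dict.empty).insert p.2.1 p.2.2)
        g.insert p.2.1 ((g.getD p.2.1 PySem.Dict.empty).insert p.1 p.2.2)) g).keys).length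
        ≤ g.keys.length + 2 * l.length := by
  induction l with
  | nil => intro g; simp
  | cons p rest ih =>
    intro g
    rw [List.foldl_cons]
    refine le_trans (ih _) ?_
    have h1 := keys_len_insert_le g p.1 ((g.getD p.1 PySem.Dict.empty).insert p.2.1 p.2.2)
    have h2 := keys_len_insert_le (g.insert p.1 ((g.getD p.1 PySem.Dict.empty).insert p.2.1 p.2.2)) p.2.1
      (((g.insert p.1 ((g.getD p.1 PySem.Dict.empty).insert p.2.1 p.2.2)).getD p.2.1 PySem.Dict.empty).insert p.1 p.2.2)
    simp only [List.length_cons]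
    omega

theorem keys_bound_buildA (roads : List (Int × Int × Int)) :
    (buildA roads).keys.length ≤ 2 * roads.length := by
  unfold buildA
  have := keys_bound_aux roads PySem.Dict.empty
  simpa [PySem.Dict.keys_empty] using this

-- ---- counting unseen universe elements (for fuel sufficiency) ----
def countUnseen (U : List Int) (seen : PySem.Set Int) : Nat :=
  (U.filter (fun x => !(PySem.Set.contains seen x))).length

theorem contains_add_iff (s : PySem.Set Int) (x y : Int) :
    PySem.Set.contains (PySem.Set.add s x) y = true ↔ (PySem.Set.contains s y = true ∨ y = x) := by
  simp [PySem.Set.mem_add]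

theorem filter_len_mono {α : Type} (p q : α → Bool) (l : List α)
    (h : ∀ x ∈ l, p x = true → q x = true) :
    (l.filter p).length ≤ (l.filter q).length := by
  induction l with
  | nil => simp
  | cons y ys ih =>
    rw [List.filter_cons, List.filter_cons]
    have ih' := ih (fun x hx => h x (List.mem_cons_of_mem _ hx))
    cases hp : p y
    · cases hq : q y <;> simp <;> omega
    · rw [h y List.mem_cons_self hp]
      simpa using ih'

theorem filter_len_lt {α : Type} (p q : α → Bool) (l : List α)
    (h : ∀ x ∈ l, p x = true → q x = true) (x : α)
    (hpx : p x = false) (hqx : q x = true) (hx : x ∈ l) :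
    (l.filter p).length < (l.filter q).length := by
  revert h
  induction l with
  | nil => cases hx
  | cons y ys ih =>
    intro h
    rw [List.filter_cons, List.filter_cons]
    have hmono := filter_len_mono p q ys (fun z hz => h z (List.mem_cons_of_mem _ hz))
    rcases List.mem_cons.mp hx with hx' | hx'
    · subst hx'; rw [hpx, hqx]; simp; omega
    · have ih' := ih hx' (fun z hz => h z (List.mem_cons_of_mem _ hz))
      cases hp : p y
      · cases hq : q y <;> simp <;> omega
      · rw [h y List.mem_cons_self hp]; simpa using ih'

theorem countUnseen_mono (U : List Int) (s s' : PySem.Set Int)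
    (h : ∀ x, PySem.Set.contains s x = true → PySem.Set.contains s' x = true) :
    countUnseen U s' ≤ countUnseen U s := by
  refine filter_len_mono _ _ U (fun x _ hp => ?_)
  cases hc2 : PySem.Set.contains s x
  · simp
  · exact absurd (h x hc2) (by simpa using hp)

theorem countUnseen_add_lt (U : List Int) (s : PySem.Set Int) (x : Int)
    (hx : x ∈ U) (hs : PySem.Set.contains s x = false) :
    countUnseen U (PySem.Set.add s x) < countUnseen U s := by
  refine filter_len_lt _ _ U (fun z _ hp => ?_) x ?_ ?_ hx
  · simp only [Bool.not_eq_true'] at hp ⊢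
    cases hc : PySem.Set.contains s z
    · rfl
    · exact absurd ((contains_add_iff s x z).mpr (Or.inl hc)) (by rw [hp]; simp)
  · simp
  · simpa using hs

theorem countUnseen_le_len (U : List Int) (s : PySem.Set Int) :
    countUnseen U s ≤ U.length := List.length_filter_le _ _

-- ---- top-two-of-positives: A's streaming update vs B's sorted(pos)[-2:] ----
def stepS (ab : Int × Int) (d : Int) : Int × Int :=
  if 0 < d then (if ab.1 < d then (d, ab.1) else (ab.1, max ab.2 d)) else ab

def insDesc (d : Int) : List Int → List Int
  | [] => [d]
  | x :: xs => if x ≤ d then d :: x :: xs else x :: insDesc d xs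

def sortDesc (l : List Int) : List Int := l.foldr insDesc []

def top2 (l : List Int) : Int × Int :=
  match sortDesc l with
  | [] => (0, 0)
  | [a] => (a, 0)
  | a :: b :: _ => (a, b)

theorem perm_insDesc (d : Int) (l : List Int) : (insDesc d l).Perm (d :: l) := by
  induction l with
  | nil => simp [insDesc]
  | cons x xs ih =>
    unfold insDesc
    split_ifs
    · exact List.Perm.refl _
    · exact (List.Perm.cons x ih).trans (List.Perm.swap d x xs)

theorem pairwise_insDesc (d : Int) (l : List Int)
    (h : l.Pairwise (fun a b => b ≤ a)) : (insDesc d l).Pairwise (fun a b => b ≤ a) := by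
  induction l with
  | nil => simp [insDesc]
  | cons x xs ih =>
    unfold insDesc
    rcases List.pairwise_cons.mp h with ⟨hx, hxs⟩
    split_ifs with hxd
    · refine List.pairwise_cons.mpr ⟨?_, h⟩
      intro y hy
      rcases List.mem_cons.mp hy with rfl | hy
      · exact hxd
      · exact le_trans (hx y hy) hxd
    · refine List.pairwise_cons.mpr ⟨?_, ih hxs⟩
      intro y hy
      have := (perm_insDesc d xs).mem_iff.mp hy
      rcases List.mem_cons.mp this with rfl | hy'
      · omega
      · exact hx y hy'

theorem sortDesc_perm (l : List Int) : (sortDesc l).Perm l := by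
  induction l with
  | nil => simp [sortDesc]
  | cons x xs ih =>
    have : sortDesc (x :: xs) = insDesc x (sortDesc xs) := rfl
    rw [this]
    exact (perm_insDesc x (sortDesc xs)).trans (List.Perm.cons x ih)

theorem sortDesc_pairwise (l : List Int) : (sortDesc l).Pairwise (fun a b => b ≤ a) := by
  induction l with
  | nil => simp [sortDesc]
  | cons x xs ih => exact pairwise_insDesc x (sortDesc xs) ih

theorem sortDesc_eq_of_perm (l l' : List Int) (h : l.Perm l') : sortDesc l = sortDesc l' :=
  List.eq_of_perm_of_sorted (fun a b _ _ h1 h2 => le_antisymm h2 h1)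
    (sortDesc_pairwise l) (sortDesc_pairwise l')
    ((sortDesc_perm l).trans (h.trans (sortDesc_perm l').symm))

theorem top2_cons (d : Int) (l : List Int) (hd : 0 < d) (hl : ∀ x ∈ l, 0 < x) :
    top2 (d :: l) = stepS (top2 l) d := by
  have hsd : sortDesc (d :: l) = insDesc d (sortDesc l) := rfl
  cases h : sortDesc l with
  | nil =>
    simp [top2, hsd, h, insDesc, stepS, hd]
  | cons x xs =>
    have hxmem : x ∈ l := (sortDesc_perm l).mem_iff.mp (by rw [h]; exact List.mem_cons_self)
    have hxpos : 0 < x := hl x hxmem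
    have hpw := sortDesc_pairwise l
    rw [h] at hpw
    rcases List.pairwise_cons.mp hpw with ⟨hx, _⟩
    rw [top2, top2, hsd, h]
    unfold insDesc
    split_ifs with hxd
    · -- x ≤ d : sortDesc (d::l) = d :: x :: xs
      cases xs with
      | nil =>
        by_cases hlt : x < d
        · simp [stepS, hd, hlt]
        · have : x = d := le_antisymm hxd (not_lt.mp hlt)
          subst this
          simp [stepS, hd, hlt]
          omega
      | cons y ys =>
        have hyx : y ≤ x := hx y List.mem_cons_self
        by_cases hlt : x < d
        · simp [stepS, hd, hlt]
        · have : x = d := le_antisymm hxd (not_lt.mp hlt)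
          subst this
          simp [stepS, hd, hlt]
          omega
    · -- d < x
      have hdx : d < x := not_le.mp hxd
      cases xs with
      | nil =>
        simp [insDesc, stepS, hd, not_lt.mpr (le_of_lt hdx)]
        omega
      | cons y ys =>
        have hyx : y ≤ x := hx y List.mem_cons_self
        unfold insDesc
        split_ifs with hyd
        · simp [stepS, hd, not_lt.mpr (le_of_lt hdx)]
          omega
        · simp [stepS, hd, not_lt.mpr (le_of_lt hdx)]
          omega

theorem foldl_stepS_top2 (P : List Int) :
    ∀ l, (∀ x ∈ P, 0 < x) → (∀ x ∈ l, 0 < x) →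
      P.foldl stepS (top2 l) = top2 (P.reverse ++ l) := by
  induction P with
  | nil => intro l _ _; simp
  | cons d P' ih =>
    intro l hP hl
    have hd : 0 < d := hP d List.mem_cons_self
    rw [List.foldl_cons, ← top2_cons d l hd hl]
    have := ih (d :: l) (fun x hx => hP x (List.mem_cons_of_mem _ hx))
      (fun x hx => by rcases List.mem_cons.mp hx with rfl | hx; exact hd; exact hl x hx)
    rw [this]
    congr 1
    simp

theorem top2_perm (l l' : List Int) (h : l.Perm l') : top2 l = top2 l' := by
  unfold top2
  rw [sortDesc_eq_of_perm l l' h]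

theorem foldl_stepS_eq_top2 (P : List Int) (hP : ∀ x ∈ P, 0 < x) :
    P.foldl stepS (0, 0) = top2 P := by
  have h0 : (0, 0) = top2 ([] : List Int) := rfl
  rw [h0, foldl_stepS_top2 P [] hP (by simp)]
  exact top2_perm _ _ (by simp)

theorem sorted_asc_eq_reverse_sortDesc (P : List Int) :
    PySem.List.sorted P (fun x => x) false = (sortDesc P).reverse := by
  refine List.eq_of_perm_of_sorted (fun a b _ _ h1 h2 => le_antisymm h1 h2) ?_ ?_ ?_
  · exact PySem.List.sorted_pairwise P (fun x => x)
  · rw [List.pairwise_reverse]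
    exact List.Pairwise.imp (fun h => h) (sortDesc_pairwise P)
  · exact (PySem.List.sorted_perm _ _ _).trans ((sortDesc_perm P).symm.trans (List.reverse_perm _).symm)

theorem top2_sum_last (P : List Int) (hP : ∀ x ∈ P, 0 < x) :
    (PySem.List.slice (PySem.List.sorted P (fun x => x) false) (some (-2)) none).sum
        = (P.foldl stepS (0, 0)).1 + (P.foldl stepS (0, 0)).2 ∧
    (if (PySem.List.slice (PySem.List.sorted P (fun x => x) false) (some (-2)) none).isEmpty then 0
     else (PySem.List.slice (PySem.List.sorted P (fun x => x) false) (some (-2)) none).getLastD 0)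
        = (P.foldl stepS (0, 0)).1 := by
  rw [foldl_stepS_eq_top2 P hP]
  rw [PySem.List.slice_from_neg_ofNat _ 2 (by norm_num)]
  rw [sorted_asc_eq_reverse_sortDesc]
  rcases h : sortDesc P with _ | ⟨a, _ | ⟨b, rest⟩⟩
  · simp [top2, h]
  · simp [top2, h]
  · have hrev : (a :: b :: rest).reverse = rest.reverse ++ [b, a] := by simp
    have hlen : (a :: b :: rest).reverse.length - 2 = rest.reverse.length := by simp
    rw [hrev] at hlen ⊢
    rw [hlen, List.drop_left]
    constructor
    · simp [top2, h]; ring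
    · simp [top2, h]

-- ---- DP bookkeeping predicates ----
def dsOf (bd : PySem.Dict Int Bool) (gd : PySem.Dict Int Int) (dis : Int)
    (recs : List (Int × Int)) : List (Int × Int) :=
  recs.map (fun p => ((if bd.getD p.1 false then p.2 + gd.getD p.1 0 else -dis), p.2))

def DPagree (ch : PySem.Dict Int (List (Int × Int))) (di : PySem.Dict Int Int)
    (s : S1) (segs : List Int) : Prop :=
  ∀ x ∈ segs, ch.getD x [] = s.children.getD x [] ∧ di.getD x 0 = s.dist.getD x 0

-- invariant of the partially processed node: folding the reversed concatenation of the
-- children's segments adds Tc to total, maxes Bc into best, leaves non-segment keys alone,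
-- and makes the recorded children evaluate to the d-value list dws
def SegsProp (tgt : PySem.Set Int) (s : S1) (node dis : Int) (segs : List Int)
    (Tc Bc : Int) (dws : List (Int × Int)) : Prop :=
  ∀ ch di (st : DP), 0 ≤ st.best → DPagree ch di s segs →
    (segs.reverse.foldl (dpStep tgt ch di) st).total = st.total + Tc ∧
    (segs.reverse.foldl (dpStep tgt ch di) st).best = max st.best Bc ∧
    dsOf (segs.reverse.foldl (dpStep tgt ch di) st).belong
         (segs.reverse.foldl (dpStep tgt ch di) st).gain dis (s.children.getD node []) = dws ∧
    (∀ x, x ∉ segs →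
      (segs.reverse.foldl (dpStep tgt ch di) st).belong.getD x false = st.belong.getD x false ∧
      (segs.reverse.foldl (dpStep tgt ch di) st).gain.getD x 0 = st.gain.getD x 0)

-- invariant of a completed subtree segment
def NodeProp (tgt : PySem.Set Int) (s : S1) (node : Int) (seg : List Int)
    (T B gn : Int) (bel : Bool) : Prop :=
  ∀ ch di (st : DP), 0 ≤ st.best → DPagree ch di s seg →
    (seg.reverse.foldl (dpStep tgt ch di) st).total = st.total + T ∧
    (seg.reverse.foldl (dpStep tgt ch di) st).best = max st.best B ∧
    (seg.reverse.foldl (dpStep tgt ch di) st).belong.getD node false = bel ∧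
    (seg.reverse.foldl (dpStep tgt ch di) st).gain.getD node 0 = gn ∧
    (∀ x, x ∉ seg →
      (seg.reverse.foldl (dpStep tgt ch di) st).belong.getD x false = st.belong.getD x false ∧
      (seg.reverse.foldl (dpStep tgt ch di) st).gain.getD x 0 = st.gain.getD x 0)

def tOf (Tc : Int) (dws : List (Int × Int)) : Int :=
  Tc + 2 * ((dws.filter (fun p => 0 < p.1)).map Prod.snd).sum

-- the simulation statement for A's dfs vs B's build at a given fuel
def OuterStmt (g : PySem.Dict Int (PySem.Dict Int Int)) (cset : PySem.Set Int)
    (U : List Int) (fuel : Nat) : Prop :=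
  ∀ (node : Int) (s : S1) (vis : PySem.Set Int) (a0 a1 : Int),
    PySem.Set.contains vis node = false →
    s.seen = PySem.Set.add vis node →
    countUnseen U s.seen < fuel →
    0 ≤ a1 →
    ∃ (seg : List Int) (T B gn : Int) (bel : Bool),
      dfsA g cset fuel node (s.dist.getD node 0) ⟨vis, a0, a1⟩
        = ((if bel then s.dist.getD node 0 + gn else 0),
           ⟨(buildT g fuel node s).seen, a0 + T, max a1 B⟩) ∧
      0 ≤ gn ∧ 0 ≤ B ∧
      (buildT g fuel node s).order = s.order ++ seg ∧
      (∀ x ∈ seg, PySem.Set.contains (buildT g fuel node s).seen x = true) ∧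
      (∀ x ∈ seg, x = node ∨ PySem.Set.contains s.seen x = false) ∧
      NodeProp cset (buildT g fuel node s) node seg T B gn bel ∧
      (∀ x, PySem.Set.contains s.seen x = true → PySem.Set.contains (buildT g fuel node s).seen x = true) ∧
      (∀ x, PySem.Set.contains s.seen x = true → (buildT g fuel node s).dist.getD x 0 = s.dist.getD x 0) ∧
      (∀ x, PySem.Set.contains s.seen x = true → x ≠ node → (buildT g fuel node s).children.getD x [] = s.children.getD x [])

-- the simulation statement for A's neighbour loop vs B's pass-1 loop
def InnerStmt (g : PySem.Dict Int (PySem.Dict Int Int)) (cset : PySem.Set Int)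
    (U : List Int) (fuel : Nat) : Prop :=
  ∀ (items : List (Int × Int)) (node dis : Int) (s : S1) (segs : List Int)
    (isB : Bool) (m0 m1 a0 a1 Tc Bc : Int) (dws : List (Int × Int)) (orderBase : List Int),
    (∀ p ∈ items, (g.getD node PySem.Dict.empty).getD p.1 0 = p.2) →
    (∀ p ∈ items, p.1 ∈ U) →
    PySem.Set.contains s.seen node = true →
    s.dist.getD node 0 = dis →
    countUnseen U s.seen < fuel + 1 →
    0 ≤ a1 → 0 ≤ Bc → 0 ≤ m1 → m1 ≤ m0 →
    (m0, m1) = dws.foldl (fun ab p => stepS ab p.1) (0, 0) →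
    isB = (cset.contains node || dws.any (fun p => decide (0 < p.1))) →
    SegsProp cset s node dis segs Tc Bc dws →
    (∀ x ∈ segs, PySem.Set.contains s.seen x = true ∧ x ≠ node) →
    s.order = orderBase ++ segs →
    ∃ (segs' : List Int) (Tc' Bc' : Int) (dws' : List (Int × Int)) (isB' : Bool) (m0' m1' : Int),
      loopA g (dfsA g cset fuel) node dis items ⟨⟨s.seen, a0 + tOf Tc dws, max a1 Bc⟩, isB, m0, m1⟩
        = ⟨⟨(buildLoop g (buildT g fuel) node items s).seen, a0 + tOf Tc' dws', max a1 Bc'⟩, isB', m0', m1'⟩ ∧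
      0 ≤ m1' ∧ m1' ≤ m0' ∧ 0 ≤ Bc' ∧
      (m0', m1') = dws'.foldl (fun ab p => stepS ab p.1) (0, 0) ∧
      isB' = (cset.contains node || dws'.any (fun p => decide (0 < p.1))) ∧
      SegsProp cset (buildLoop g (buildT g fuel) node items s) node dis segs' Tc' Bc' dws' ∧
      (∀ x ∈ segs', PySem.Set.contains (buildLoop g (buildT g fuel) node items s).seen x = true ∧ x ≠ node) ∧
      (buildLoop g (buildT g fuel) node items s).order = orderBase ++ segs' ∧
      (∀ x ∈ segs', x ∈ segs ∨ PySem.Set.contains s.seen x = false) ∧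
      (∀ x, PySem.Set.contains s.seen x = true → PySem.Set.contains (buildLoop g (buildT g fuel) node items s).seen x = true) ∧
      (∀ x, PySem.Set.contains s.seen x = true → (buildLoop g (buildT g fuel) node items s).dist.getD x 0 = s.dist.getD x 0) ∧
      (∀ x, PySem.Set.contains s.seen x = true → x ≠ node → (buildLoop g (buildT g fuel) node items s).children.getD x [] = s.children.getD x [])

theorem inner_sim (g : PySem.Dict Int (PySem.Dict Int Int)) (cset : PySem.Set Int) (U : List Int)
    (fuel : Nat) (IH : OuterStmt g cset U fuel) : InnerStmt g cset U fuel := by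
  intro items
  induction items with
  | nil =>
    intro node dis s segs isB m0 m1 a0 a1 Tc Bc dws orderBase
      hval hUit hsn hdis hcnt ha1 hBc hm1 hm10 hstream hisB hSegs hfresh horder
    exact ⟨segs, Tc, Bc, dws, isB, m0, m1, rfl, hm1, hm10, hBc, hstream, hisB, hSegs,
      hfresh, horder, (fun x hx => Or.inl hx), (fun x hx => hx), (fun x _ => rfl), (fun x _ _ => rfl)⟩
  | cons p rest ih =>
    intro node dis s segs isB m0 m1 a0 a1 Tc Bc dws orderBase
      hval hUit hsn hdis hcnt ha1 hBc hm1 hm10 hstream hisB hSegs hfresh horder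
    obtain ⟨nxt, w⟩ := p
    have hvalr : ∀ q ∈ rest, (g.getD node PySem.Dict.empty).getD q.1 0 = q.2 :=
      fun q hq => hval q (List.mem_cons_of_mem _ hq)
    have hUitr : ∀ q ∈ rest, q.1 ∈ U := fun q hq => hUit q (List.mem_cons_of_mem _ hq)
    by_cases hc : PySem.Set.contains s.seen nxt = true
    · -- already seen: both sides skip
      simp only [loopA, buildLoop, hc, if_true]
      exact ih node dis s segs isB m0 m1 a0 a1 Tc Bc dws orderBase
        hvalr hUitr hsn hdis hcnt ha1 hBc hm1 hm10 hstream hisB hSegs hfresh horder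
    · -- fresh neighbour: recurse into the child
      have hc' : PySem.Set.contains s.seen nxt = false := by simpa using hc
      simp only [loopA, buildLoop, hc, if_false, Bool.false_eq_true]
      set s2 : S1 := { s with
        seen := PySem.Set.add s.seen nxt,
        dist := s.dist.insert nxt (s.dist.getD node 0 + w),
        children := s.children.insert node ((s.children.getD node []) ++ [(nxt, w)]) } with hs2
      have hseen2 : s2.seen = PySem.Set.add s.seen nxt := rfl
      have hnxtU : nxt ∈ U := hUit (nxt, w) List.mem_cons_self
      have hcnt2 : countUnseen U s2.seen < fuel := by
        have h1 := countUnseen_add_lt U s.seen nxt hnxtU hc'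
        rw [hseen2]; omega
      have h0b : (0 : Int) ≤ max a1 Bc := le_trans ha1 (le_max_left _ _)
      obtain ⟨segC, TC, BC, gnC, belC, heqC, hgnC, hBC, horderC, hseenC, hfreshC, hNodeC,
          hgrowC, hdistC, hchC⟩ :=
        IH nxt s2 s.seen (a0 + tOf Tc dws) (max a1 Bc) hc' hseen2 hcnt2 h0b
      have hdis2 : s2.dist.getD nxt 0 = dis + w := by
        show (s.dist.insert nxt (s.dist.getD node 0 + w)).getD nxt 0 = dis + w
        rw [PySem.Dict.getD_insert_self, hdis]
      rw [hdis2] at heqC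
      set s3 := buildT g fuel nxt s2 with hs3
      -- membership / stability transported to s3
      have hmem2 : ∀ x, PySem.Set.contains s.seen x = true → PySem.Set.contains s2.seen x = true :=
        fun x hx => (contains_add_iff s.seen nxt x).mpr (Or.inl hx)
      have hgrow3 : ∀ x, PySem.Set.contains s.seen x = true → PySem.Set.contains s3.seen x = true :=
        fun x hx => hgrowC x (hmem2 x hx)
      have hne_of_seen : ∀ x, PySem.Set.contains s.seen x = true → x ≠ nxt := by
        intro x hx hxe; rw [hxe] at hx; rw [hx] at hc'; cases hc'
      have hdist3 : ∀ x, PySem.Set.contains s.seen x = true → s3.dist.getD x 0 = s.dist.getD x 0 := by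
        intro x hx
        have h1 := hdistC x (hmem2 x hx)
        have h2 : s2.dist.getD x 0 = s.dist.getD x 0 := by
          show (s.dist.insert nxt (s.dist.getD node 0 + w)).getD x 0 = s.dist.getD x 0
          rw [PySem.Dict.getD_insert, if_neg (hne_of_seen x hx)]
        rw [h1, h2]
      have hch3 : ∀ x, PySem.Set.contains s.seen x = true → x ≠ node →
          s3.children.getD x [] = s.children.getD x [] := by
        intro x hx hxn
        have h1 := hchC x (hmem2 x hx) (hne_of_seen x hx)
        have h2 : s2.children.getD x [] = s.children.getD x [] := by
          show (s.children.insert node ((s.children.getD node []) ++ [(nxt, w)])).getD x []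
            = s.children.getD x []
          rw [PySem.Dict.getD_insert, if_neg hxn]
        rw [h1, h2]
      have hdis3 : s3.dist.getD node 0 = dis := by rw [hdist3 node hsn, hdis]
      have hsn3 : PySem.Set.contains s3.seen node = true := hgrow3 node hsn
      have hcnt3 : countUnseen U s3.seen < fuel + 1 :=
        lt_of_le_of_lt (countUnseen_mono U s.seen s3.seen hgrow3) hcnt
      have hsnode2 : PySem.Set.contains s2.seen node = true := hmem2 node hsn
      have hnxt_ne_node : nxt ≠ node := by
        intro h; rw [h] at hc'; rw [hsn] at hc'; cases hc'
      -- recorded children of node in s3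
      have hrec3 : s3.children.getD node [] = s.children.getD node [] ++ [(nxt, w)] := by
        have h1 := hchC node hsnode2 hnxt_ne_node.symm
        have h2 : s2.children.getD node [] = s.children.getD node [] ++ [(nxt, w)] := by
          show (s.children.insert node ((s.children.getD node []) ++ [(nxt, w)])).getD node []
            = s.children.getD node [] ++ [(nxt, w)]
          rw [PySem.Dict.getD_insert_self]
        rw [h1, h2]
      have hnxt_notin_segs : nxt ∉ segs := by
        intro h; exact absurd (hfresh nxt h).1 (by rw [hc']; simp)
      -- the child's d value
      set dnew : Int := if belC then w + gnC else -dis with hdnew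
      have hd : (if belC = true then dis + w + gnC else 0) - dis = dnew := by
        rw [hdnew]; cases belC <;> simp <;> ring
      -- new invariant bundle for segs ++ segC
      have hSegs2 : SegsProp cset s3 node dis (segs ++ segC) (Tc + TC) (max Bc BC)
          (dws ++ [(dnew, w)]) := by
        intro ch di st h0 hagree
        have hrevapp : (segs ++ segC).reverse = segC.reverse ++ segs.reverse := by simp
        rw [hrevapp, List.foldl_append]
        have hagreeC : DPagree ch di s3 segC := fun x hx =>
          hagree x (List.mem_append_right _ hx)
        obtain ⟨hT1, hB1, hbel1, hgn1, hpres1⟩ := hNodeC ch di st h0 hagreeC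
        set st1 := segC.reverse.foldl (dpStep cset ch di) st with hst1
        have hagreeS : DPagree ch di s segs := by
          intro x hx
          obtain ⟨hx1, hx2⟩ := hagree x (List.mem_append_left _ hx)
          obtain ⟨hxs, hxn⟩ := hfresh x hx
          exact ⟨by rw [hx1, hch3 x hxs hxn], by rw [hx2, hdist3 x hxs]⟩
        have h0' : (0 : Int) ≤ st1.best := by rw [hB1]; exact le_trans h0 (le_max_left _ _)
        obtain ⟨hT2, hB2, hds2, hpres2⟩ := hSegs ch di st1 h0' hagreeS
        refine ⟨?_, ?_, ?_, ?_⟩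
        · rw [hT2, hT1]; ring
        · rw [hB2, hB1]
          rw [max_assoc, max_comm BC Bc, ← max_assoc]
        · rw [hrec3]
          unfold dsOf
          rw [List.map_append]
          have hfold_eq : dsOf (segs.reverse.foldl (dpStep cset ch di) st1).belong
              (segs.reverse.foldl (dpStep cset ch di) st1).gain dis (s.children.getD node []) = dws := hds2
          unfold dsOf at hfold_eq
          rw [hfold_eq]
          congr 1
          simp only [List.map_cons, List.map_nil]
          obtain ⟨hpb, hpg⟩ := hpres2 nxt hnxt_notin_segs
          rw [hpb, hpg, hbel1, hgn1, hdnew]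
        · intro x hx
          have hxC : x ∉ segC := fun h => hx (List.mem_append_right _ h)
          have hxS : x ∉ segs := fun h => hx (List.mem_append_left _ h)
          obtain ⟨ha1', ha2'⟩ := hpres2 x hxS
          obtain ⟨hb1', hb2'⟩ := hpres1 x hxC
          exact ⟨by rw [ha1', hb1'], by rw [ha2', hb2']⟩
      have hfresh2 : ∀ x ∈ segs ++ segC, PySem.Set.contains s3.seen x = true ∧ x ≠ node := by
        intro x hx
        rcases List.mem_append.mp hx with hx | hx
        · obtain ⟨h1, h2⟩ := hfresh x hx
          exact ⟨hgrow3 x h1, h2⟩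
        · refine ⟨hseenC x hx, ?_⟩
          rcases hfreshC x hx with rfl | h
          · exact hnxt_ne_node
          · intro he; rw [he, hsnode2] at h; cases h
      have horder3 : s3.order = orderBase ++ (segs ++ segC) := by
        have : s2.order = s.order := rfl
        rw [horderC, this, horder, List.append_assoc]
      -- the new stream / flags
      have hstream2' : stepS (m0, m1) dnew = (dws ++ [(dnew, w)]).foldl (fun ab p => stepS ab p.1) (0, 0) := by
        rw [List.foldl_append, ← hstream]; rfl
      -- case split on the sign of dnew
      by_cases hdp : 0 < dnew
      · -- productive child
        have htOf : a0 + tOf Tc dws + TC + 2 * w = a0 + tOf (Tc + TC) (dws ++ [(dnew, w)]) := by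
          simp only [tOf, List.filter_append, List.map_append, List.sum_append]
          rw [List.filter_cons]
          rw [if_pos (by simpa using hdp)]
          simp; ring
        have hisB2 : true = (cset.contains node || (dws ++ [(dnew, w)]).any (fun p => decide (0 < p.1))) := by
          rw [List.any_append]
          simp [hdp]
        have hstep : stepS (m0, m1) dnew
            = if m0 < dnew then (dnew, m0) else (m0, max m1 dnew) := by
          unfold stepS; rw [if_pos hdp]
        rw [heqC, hd]
        rw [if_pos hdp]
        rw [hval (nxt, w) List.mem_cons_self]
        by_cases hm0d : m0 < dnew
        · rw [if_pos hm0d]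
          have hmax : max m0 m1 = m0 := max_eq_left hm10
          rw [hmax]
          have hstepv : stepS (m0, m1) dnew = (dnew, m0) := by rw [hstep, if_pos hm0d]
          obtain ⟨segs', Tc', Bc', dws', isB', m0', m1', hA, hr1, hr2, hr3, hr4, hr5, hr6, hr7,
              hr8, hr9, hr10, hr11, hr12⟩ :=
            ih node dis s3 (segs ++ segC) true dnew m0 a0 a1 (Tc + TC) (max Bc BC)
              (dws ++ [(dnew, w)]) orderBase hvalr hUitr hsn3 hdis3 hcnt3 ha1
              (le_trans hBc (le_max_left _ _)) (le_trans hm1 hm10) (le_of_lt hm0d)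
              (by rw [← hstream2', hstepv]) hisB2 hSegs2 hfresh2 horder3
          refine ⟨segs', Tc', Bc', dws', isB', m0', m1', ?_, hr1, hr2, hr3, hr4, hr5, hr6, hr7, hr8,
            ?_, ?_, ?_, ?_⟩
          · rw [← htOf, ← max_assoc] at hA
            exact hA
          · intro x hx
            rcases hr9 x hx with h | h
            · rcases List.mem_append.mp h with h | h
              · exact Or.inl h
              · rcases hfreshC x h with rfl | h2
                · exact Or.inr hc'
                · right
                  cases hcx : PySem.Set.contains s.seen x
                  · rfl
                  · rw [hmem2 x hcx] at h2; cases h2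
            · right
              cases hcx : PySem.Set.contains s.seen x
              · rfl
              · rw [hgrow3 x hcx] at h; cases h
          · exact fun x hx => hr10 x (hgrow3 x hx)
          · exact fun x hx => by rw [hr11 x (hgrow3 x hx), hdist3 x hx]
          · exact fun x hx hxn => by rw [hr12 x (hgrow3 x hx) hxn, hch3 x hx hxn]
        · rw [if_neg hm0d]
          have hstepv : stepS (m0, m1) dnew = (m0, max m1 dnew) := by rw [hstep, if_neg hm0d]
          obtain ⟨segs', Tc', Bc', dws', isB', m0', m1', hA, hr1, hr2, hr3, hr4, hr5, hr6, hr7,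
              hr8, hr9, hr10, hr11, hr12⟩ :=
            ih node dis s3 (segs ++ segC) true m0 (max m1 dnew) a0 a1 (Tc + TC) (max Bc BC)
              (dws ++ [(dnew, w)]) orderBase hvalr hUitr hsn3 hdis3 hcnt3 ha1
              (le_trans hBc (le_max_left _ _)) (le_trans hm1 (le_max_left _ _))
              (max_le hm10 (not_lt.mp hm0d))
              (by rw [← hstream2', hstepv]) hisB2 hSegs2 hfresh2 horder3
          refine ⟨segs', Tc', Bc', dws', isB', m0', m1', ?_, hr1, hr2, hr3, hr4, hr5, hr6, hr7, hr8,
            ?_, ?_, ?_, ?_⟩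
          · rw [← htOf, ← max_assoc] at hA
            exact hA
          · intro x hx
            rcases hr9 x hx with h | h
            · rcases List.mem_append.mp h with h | h
              · exact Or.inl h
              · rcases hfreshC x h with rfl | h2
                · exact Or.inr hc'
                · right
                  cases hcx : PySem.Set.contains s.seen x
                  · rfl
                  · rw [hmem2 x hcx] at h2; cases h2
            · right
              cases hcx : PySem.Set.contains s.seen x
              · rfl
              · rw [hgrow3 x hcx] at h; cases h
          · exact fun x hx => hr10 x (hgrow3 x hx)
          · exact fun x hx => by rw [hr11 x (hgrow3 x hx), hdist3 x hx]
          · exact fun x hx hxn => by rw [hr12 x (hgrow3 x hx) hxn, hch3 x hx hxn]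
      · -- unproductive child
        have htOf : a0 + tOf Tc dws + TC = a0 + tOf (Tc + TC) (dws ++ [(dnew, w)]) := by
          simp only [tOf, List.filter_append, List.map_append, List.sum_append]
          rw [List.filter_cons]
          rw [if_neg (by simpa using hdp)]
          simp; ring
        have hisB2 : isB = (cset.contains node || (dws ++ [(dnew, w)]).any (fun p => decide (0 < p.1))) := by
          rw [List.any_append]
          simp only [List.any_cons, List.any_nil]
          rw [hisB]
          simp [hdp]
        have hstepv : stepS (m0, m1) dnew = (m0, m1) := by unfold stepS; rw [if_neg hdp]
        rw [heqC, hd]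
        rw [if_neg hdp]
        obtain ⟨segs', Tc', Bc', dws', isB', m0', m1', hA, hr1, hr2, hr3, hr4, hr5, hr6, hr7,
            hr8, hr9, hr10, hr11, hr12⟩ :=
          ih node dis s3 (segs ++ segC) isB m0 m1 a0 a1 (Tc + TC) (max Bc BC)
            (dws ++ [(dnew, w)]) orderBase hvalr hUitr hsn3 hdis3 hcnt3 ha1
            (le_trans hBc (le_max_left _ _)) hm1 hm10
            (by rw [← hstream2', hstepv]) hisB2 hSegs2 hfresh2 horder3
        refine ⟨segs', Tc', Bc', dws', isB', m0', m1', ?_, hr1, hr2, hr3, hr4, hr5, hr6, hr7, hr8,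
          ?_, ?_, ?_, ?_⟩
        · rw [← htOf, ← max_assoc] at hA
          exact hA
        · intro x hx
          rcases hr9 x hx with h | h
          · rcases List.mem_append.mp h with h | h
            · exact Or.inl h
            · rcases hfreshC x h with rfl | h2
              · exact Or.inr hc'
              · right
                cases hcx : PySem.Set.contains s.seen x
                · rfl
                · rw [hmem2 x hcx] at h2; cases h2
          · right
            cases hcx : PySem.Set.contains s.seen x
            · rfl
            · rw [hgrow3 x hcx] at h; cases h
        · exact fun x hx => hr10 x (hgrow3 x hx)
        · exact fun x hx => by rw [hr11 x (hgrow3 x hx), hdist3 x hx]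
        · exact fun x hx hxn => by rw [hr12 x (hgrow3 x hx) hxn, hch3 x hx hxn]

-- folding the streamed update over all (d, w) pairs only looks at the positive d's
theorem foldl_stepS_fst_filter (l : List (Int × Int)) :
    ∀ ab, l.foldl (fun ab p => stepS ab p.1) ab
      = ((l.filter (fun p => 0 < p.1)).map Prod.fst).foldl stepS ab := by
  induction l with
  | nil => intro ab; rfl
  | cons p rest ih =>
    intro ab
    rw [List.foldl_cons, List.filter_cons]
    by_cases hp : 0 < p.1
    · rw [if_pos (by simpa using hp), List.map_cons, List.foldl_cons, ih]
    · rw [if_neg (by simpa using hp), ih]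
      have : stepS ab p.1 = ab := by unfold stepS; rw [if_neg hp]
      rw [this]

theorem isEmpty_filter_any (l : List (Int × Int)) :
    ((l.filter (fun p => 0 < p.1)).map Prod.fst).isEmpty = !(l.any (fun p => decide (0 < p.1))) := by
  induction l with
  | nil => rfl
  | cons p rest ih =>
    rw [List.filter_cons, List.any_cons]
    by_cases hp : 0 < p.1
    · rw [if_pos (by simpa using hp)]
      simp [hp]
    · rw [if_neg (by simpa using hp), ih]
      simp [hp]

theorem pos_mem_filter (l : List (Int × Int)) (x : Int)
    (hx : x ∈ (l.filter (fun p => 0 < p.1)).map Prod.fst) : 0 < x := by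
  rcases List.mem_map.mp hx with ⟨p, hp, rfl⟩
  have := List.of_mem_filter hp
  simpa using this

theorem outer_sim (g : PySem.Dict Int (PySem.Dict Int Int)) (cset : PySem.Set Int) (U : List Int)
    (hnd : ∀ n, (g.getD n PySem.Dict.empty).keys.Nodup)
    (hU : ∀ n x, ((g.getD n PySem.Dict.empty).contains x = true) → x ∈ U) :
    ∀ fuel, OuterStmt g cset U fuel := by
  intro fuel
  induction fuel with
  | zero =>
    intro node s vis a0 a1 _ _ hcnt _
    exact absurd hcnt (by omega)
  | succ fuel ihf =>
    intro node s vis a0 a1 hvn hseen hcnt ha1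
    have hinner := inner_sim g cset U fuel ihf
    set s1 : S1 := { s with order := s.order ++ [node], children := s.children.insert node [] } with hs1
    have hseen1 : s1.seen = s.seen := rfl
    have hsn : PySem.Set.contains s1.seen node = true := by
      rw [hseen1, hseen]; exact (contains_add_iff vis node node).mpr (Or.inr rfl)
    obtain ⟨segs', Tc', Bc', dws', isB', m0', m1', heq, hm10, hm1m0, hBc0, hstream, hisB,
        hSegs, hfresh, horder, hnewfresh, hgrow, hdistst, hchst⟩ :=
      hinner ((g.getD node PySem.Dict.empty).items) node (s.dist.getD node 0) s1 []
        (cset.contains node) 0 0 a0 a1 0 0 [] (s.order ++ [node])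
        (fun p hp => PySem.Dict.getD_of_mem_items _ hp (hnd node) 0)
        (fun p hp => hU node p.1 ((PySem.Dict.contains_iff_mem_keys _ _).mpr
          (PySem.Dict.mem_keys_of_mem_items _ hp)))
        hsn rfl (by rw [hseen1]; exact hcnt) ha1 le_rfl le_rfl le_rfl rfl (by simp)
        (by
          intro ch di st h0 _
          refine ⟨by simp, by simp [max_eq_left h0], ?_, fun x _ => ⟨rfl, rfl⟩⟩
          show dsOf st.belong st.gain _ (s1.children.getD node []) = []
          have : s1.children.getD node [] = [] := by
            exact PySem.Dict.getD_insert_self _ _ _ _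
          rw [this]; rfl)
        (by simp) (by rw [hs1]; simp)
    set sEnd := buildLoop g (buildT g fuel) node ((g.getD node PySem.Dict.empty).items) s1 with hsEnd
    have hbuild : buildT g (fuel + 1) node s = sEnd := rfl
    have hdisEnd : sEnd.dist.getD node 0 = s.dist.getD node 0 := by
      have := hdistst node hsn
      simpa using this
    -- massage the entry accumulators
    have hz1 : a0 + tOf 0 [] = a0 := by simp [tOf]
    have hz2 : max a1 (0 : Int) = a1 := max_eq_left ha1
    rw [hz1, hz2] at heq
    refine ⟨node :: segs', tOf Tc' dws', max Bc' (m0' + m1'), m0', isB', ?_, ?_, ?_, ?_, ?_, ?_, ?_, ?_, ?_, ?_⟩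
    · -- the A-B value equation
      rw [hseen1, hseen] at heq
      simp only [dfsA]
      rw [hbuild, heq]
      rw [max_eq_left hm1m0, max_assoc]

    · exact le_trans hm10 hm1m0
    · exact le_trans hBc0 (le_max_left _ _)
    · rw [hbuild, horder]; simp
    · intro x hx
      rcases List.mem_cons.mp hx with rfl | hx
      · exact hgrow x hsn
      · exact (hfresh x hx).1
    · intro x hx
      rcases List.mem_cons.mp hx with rfl | hx
      · exact Or.inl rfl
      · rcases hnewfresh x hx with h | h
        · cases h
        · exact Or.inr (by rwa [hseen1] at h)
    · -- NodeProp
      intro ch di st h0 hagree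
      rw [hbuild] at hagree
      have hrev : (node :: segs').reverse = segs'.reverse ++ [node] := by simp
      rw [hrev, List.foldl_append]
      have hagree' : DPagree ch di sEnd segs' := by
        intro x hx; exact hagree x (List.mem_cons_of_mem _ hx)
      obtain ⟨hT1, hB1, hds1, hpres1⟩ := hSegs ch di st h0 hagree'
      set st1 := segs'.reverse.foldl (dpStep cset ch di) st with hst1
      obtain ⟨hchn, hdin⟩ := hagree node List.mem_cons_self
      have hdin' : di.getD node 0 = s.dist.getD node 0 := by rw [hdin, hdisEnd]
      simp only [List.foldl_cons, List.foldl_nil]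
      have hds : (ch.getD node []).map
          (fun p => ((if st1.belong.getD p.1 false then p.2 + st1.gain.getD p.1 0
            else -(di.getD node 0)), p.2)) = dws' := by
        rw [hchn, hdin']
        exact hds1
      have hpos : ∀ x ∈ (dws'.filter (fun p => 0 < p.1)).map Prod.fst, 0 < x :=
        pos_mem_filter dws'
      have hfold : (m0', m1') = ((dws'.filter (fun p => 0 < p.1)).map Prod.fst).foldl stepS (0, 0) := by
        rw [hstream]; exact foldl_stepS_fst_filter dws' (0, 0)
      obtain ⟨htsum, htlast⟩ := top2_sum_last ((dws'.filter (fun p => 0 < p.1)).map Prod.fst) hpos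
      simp only [dpStep]
      rw [hds]
      refine ⟨?_, ?_, ?_, ?_, ?_⟩
      · rw [hT1, tOf]; ring
      · rw [hB1, htsum, ← hfold, max_assoc]
      · rw [PySem.Dict.getD_insert_self]
        rw [hisB, isEmpty_filter_any, Bool.not_not]
      · rw [PySem.Dict.getD_insert_self]
        rw [htlast, ← hfold]
      · intro x hx
        have hxn : x ≠ node := fun h => hx (h ▸ List.mem_cons_self)
        have hxs : x ∉ segs' := fun h => hx (List.mem_cons_of_mem _ h)
        obtain ⟨hp1, hp2⟩ := hpres1 x hxs
        constructor
        · rw [PySem.Dict.getD_insert, if_neg hxn, hp1]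
        · rw [PySem.Dict.getD_insert, if_neg hxn, hp2]
    · intro x hx
      exact hgrow x (by rwa [hseen1])
    · intro x hx
      have := hdistst x (by rwa [hseen1])
      simpa using this
    · intro x hx hne
      have h1 := hchst x (by rwa [hseen1]) hne
      have : s1.children.getD x [] = s.children.getD x [] := by
        show (s.children.insert node []).getD x [] = s.children.getD x []
        rw [PySem.Dict.getD_insert, if_neg hne]
      rw [hbuild, h1, this]

theorem jeanisRoute_main (k : Int) (roads : List (Int × Int × Int)) (cities : List Int)
    (hpre : cities ≠ []) : jeanisRoute k roads cities = jeanisRoute_alt k roads cities := by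
  match cities with
  | [] => exact absurd rfl hpre
  | c :: cs =>
    simp only [jeanisRoute, jeanisRoute_alt, buildB_eq_buildA]
    set g := buildA roads with hg
    set cset := PySem.Set.ofList (c :: cs) with hcset
    set s0 : S1 := ⟨[], PySem.Dict.empty, PySem.Dict.ofList [(c, 0)], PySem.Set.ofList [c]⟩ with hs0
    have hnd : ∀ n, (g.getD n PySem.Dict.empty).keys.Nodup := nodup_inner_buildA roads
    have hU : ∀ n x, ((g.getD n PySem.Dict.empty).contains x = true) → x ∈ g.keys :=
      inner_sub_buildA roads
    have hvn : PySem.Set.contains PySem.Set.empty c = false := rfl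
    have hseen0 : s0.seen = PySem.Set.add PySem.Set.empty c := rfl
    have hcnt : countUnseen g.keys s0.seen < 2 * roads.length + 2 := by
      have h1 := countUnseen_le_len g.keys s0.seen
      have h2 : g.keys.length ≤ 2 * roads.length := by rw [hg]; exact keys_bound_buildA roads
      omega
    obtain ⟨seg, T, B, gn, bel, heq, hgn, hB, horder, _, _, hNode, _, _, _⟩ :=
      outer_sim g cset g.keys hnd hU (2 * roads.length + 2) c s0 PySem.Set.empty 0 0
        hvn hseen0 hcnt le_rfl
    have hdis0 : s0.dist.getD c 0 = 0 := by
      have : s0.dist = PySem.Dict.empty.insert c 0 := rfl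
      rw [this, PySem.Dict.getD_insert_self]
    rw [hdis0] at heq
    rw [heq]
    have horder' : (buildT g (2 * roads.length + 2) c s0).order = seg := by
      rw [horder]; rfl
    rw [horder']
    obtain ⟨hT, hB', _, _, _⟩ := hNode (buildT g (2 * roads.length + 2) c s0).children
      (buildT g (2 * roads.length + 2) c s0).dist ⟨0, 0, PySem.Dict.empty, PySem.Dict.empty⟩
      le_rfl (fun x _ => ⟨rfl, rfl⟩)
    rw [hT, hB']

-- ===== VERDICT (by name: the statement is the Claim_ definition above) =====
theorem jeanisRoute_spec : Claim_equal_jeanisRoute := by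
  intro k roads cities _ hpre
  unfold Spec_jeanisRoute
  exact jeanisRoute_main k roads cities hpre
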